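-- pv_equiv track=rewrite | github.com/david3xu/azure-maintie-rag | agents/knowledge_extraction/processors/relationship_processor.py | _find_entity_positions
-- ===== SOURCE A (Python) =====
-- from typing import Any, Dict, List, Optional, Set, Tuple
--
-- def _find_entity_positions(
--     content: str, entity_texts: List[str]
-- ) -> Dict[str, List[Tuple[int, int]]]:
--     """Find all positions of entities in content"""
--     positions = {}
--
--     for entity in entity_texts:
--         entity_positions = []
--         start = 0
--
--         while True:
--             pos = content.lower().find(entity.lower(), start)
--             if pos == -1:
--                 break
--             entity_positions.append((pos, pos + len(entity)))
--             start = pos + 1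
--
--         positions[entity] = entity_positions
--
--     return positions
-- ===== SOURCE B (Python) =====
-- def _find_entity_positions(content, entity_texts):
--     """Find all positions of entities in content (case-insensitive, overlapping)."""
--     content_lower = content.lower()
--     n = len(content_lower)
--     positions = {}
--     for entity in entity_texts:
--         e = entity.lower()
--         L = len(entity)
--         positions[entity] = [
--             (i, i + L) for i in range(n + 1) if content_lower[i:i + L] == e
--         ]
--     return positions
-- ===== Notes on version B (the rewrite author's own statement) =====
-- stated objective: alternative
-- what changed: Replaces the while/str.find jump loop (which re-lowers the content on every find call) with a single pre-lowered content and, per entity, a direct sliding-window scan over every candidate start index comparing the lowered slice.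
import Mathlib
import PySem

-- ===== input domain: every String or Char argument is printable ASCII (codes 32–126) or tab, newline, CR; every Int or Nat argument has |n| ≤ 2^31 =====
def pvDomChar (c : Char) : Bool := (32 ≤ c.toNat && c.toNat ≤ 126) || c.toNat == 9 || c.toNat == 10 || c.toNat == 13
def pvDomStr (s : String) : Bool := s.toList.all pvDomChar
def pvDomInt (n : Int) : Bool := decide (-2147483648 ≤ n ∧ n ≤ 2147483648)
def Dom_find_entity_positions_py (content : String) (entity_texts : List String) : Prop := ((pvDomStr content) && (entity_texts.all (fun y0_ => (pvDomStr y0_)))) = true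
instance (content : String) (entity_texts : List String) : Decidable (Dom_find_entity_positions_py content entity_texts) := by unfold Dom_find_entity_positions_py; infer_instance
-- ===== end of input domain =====

-- B lowers the content once and finds match positions by a sliding-window slice comparison
-- over every candidate index, instead of A's repeated str.find jump loop (alternative decomposition).


-- ===== PORT A =====
-- the 'while True' loop: pos = content.lower().find(entity.lower(), start); fuel only guards termination
def pvALoop (cl el : List Char) (L : Int) (start : Nat) (fuel : Nat) : List (Int × Int) :=
  match fuel with
  | 0 => []
  | fuel + 1 =>
    let pos := PySem.Chars.findFrom cl el (start : Int) none
    if pos = -1 then []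
    else (pos, pos + L) :: pvALoop cl el L (pos.toNat + 1) fuel

def find_entity_positions_py (content : String) (entity_texts : List String) : List (String × List (Int × Int)) :=
  (entity_texts.foldl (fun d entity =>
      d.insert entity
        (pvALoop (PySem.Chars.lower content.toList) (PySem.Chars.lower entity.toList)
          (entity.toList.length : Int) 0 (content.toList.length + 2)))
    PySem.Dict.empty).items

-- ===== PORT B =====
def find_entity_positions_py_alt (content : String) (entity_texts : List String) : List (String × List (Int × Int)) :=
  let cl := PySem.Chars.lower content.toList
  let n : Int := cl.length
  (entity_texts.foldl (fun d entity =>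
      let e := PySem.Chars.lower entity.toList
      let L : Int := entity.toList.length
      d.insert entity
        (((PySem.List.pyRange 0 (n + 1)).filter
            (fun i => PySem.List.slice cl (some i) (some (i + L)) == e)).map
          (fun i => (i, i + L))))
    PySem.Dict.empty).items

-- ===== PRECONDITION & SPEC =====
def Spec_find_entity_positions_py (content : String) (entity_texts : List String) (out : List (String × List (Int × Int))) : Prop := out = find_entity_positions_py_alt content entity_texts
instance (content : String) (entity_texts : List String) (out : List (String × List (Int × Int))) : Decidable (Spec_find_entity_positions_py content entity_texts out) := by unfold Spec_find_entity_positions_py; infer_instance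

-- ===== CLAIM (what is proved, stated in full; the proofs are below) =====
def Claim_equal_find_entity_positions_py : Prop := ∀ (content : String) (entity_texts : List String), Dom_find_entity_positions_py content entity_texts → Spec_find_entity_positions_py content entity_texts (find_entity_positions_py content entity_texts)

-- ===== LEMMAS AND PROOFS =====

lemma pvLower_length (xs : List Char) : (PySem.Chars.lower xs).length = xs.length := by
  simp [PySem.Chars.lower]

-- window test at a natural index j is "el is a prefix of cl.drop j"
lemma pvSlice_iff (cl el : List Char) (j : Nat) :
    ((PySem.List.slice cl (some (j : Int)) (some ((j : Int) + (el.length : Int))) == el) = true)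
      ↔ el <+: cl.drop j := by
  rw [PySem.List.slice_natCast_add, beq_iff_eq, List.prefix_iff_eq_take]
  exact eq_comm

lemma pvFindFrom_past (cl el : List Char) :
    PySem.Chars.findFrom cl el ((cl.length : Int) + 1) none = -1 := by
  simp only [PySem.Chars.findFrom]
  have h1 : ¬ ((cl.length : Int) + 1 < 0) := by omega
  rw [if_neg h1, if_pos (by omega)]

lemma pvALoop_eq (cl el : List Char) :
    ∀ (fuel start : Nat), start ≤ cl.length + 1 → cl.length + 1 - start ≤ fuel →
    pvALoop cl el (el.length : Int) start fuel =
      ((PySem.List.pyRange (start : Int) ((cl.length : Int) + 1)).filter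
          (fun i => PySem.List.slice cl (some i) (some (i + (el.length : Int))) == el)).map
        (fun i => (i, i + (el.length : Int))) := by
  intro fuel
  induction fuel with
  | zero =>
    intro start h1 h2
    have hs : start = cl.length + 1 := by omega
    subst hs
    rw [PySem.List.pyRange_one_eq_nil (by push_cast; omega)]
    rfl
  | succ fuel ih =>
    intro start h1 h2
    by_cases hse : start = cl.length + 1
    · subst hse
      rw [PySem.List.pyRange_one_eq_nil (by push_cast; omega)]
      show (if PySem.Chars.findFrom cl el ((cl.length + 1 : Nat) : Int) none = -1 then _ else _) = _
      rw [show (((cl.length + 1 : Nat)) : Int) = (cl.length : Int) + 1 by push_cast; ring,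
        if_pos (pvFindFrom_past cl el)]
      rfl
    · have hsle : start ≤ cl.length := by omega
      show (if PySem.Chars.findFrom cl el (start : Int) none = -1 then _ else _) = _
      by_cases hneg : PySem.Chars.findFrom cl el (start : Int) none = -1
      · rw [if_pos hneg]
        have hnin : ¬ el <:+: cl.drop start :=
          (PySem.Chars.findFrom_natCast_eq_neg_one_iff cl el start hsle).mp hneg
        symm
        rw [List.map_eq_nil_iff, List.filter_eq_nil_iff]
        intro i hi
        have hmem := (PySem.List.mem_pyRange_one).mp hi
        have h0i : 0 ≤ i := by omega
        have hj : i = ((i.toNat : Nat) : Int) := by omega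
        rw [hj]
        intro hP
        have hpre : el <+: cl.drop i.toNat := (pvSlice_iff cl el i.toNat).mp hP
        apply hnin
        have hsuf : cl.drop i.toNat <:+ cl.drop start := by
          have : cl.drop i.toNat = (cl.drop start).drop (i.toNat - start) := by
            rw [List.drop_drop]; congr 1; omega
          rw [this]; exact List.drop_suffix _ _
        exact hpre.isInfix.trans hsuf.isInfix
      · rw [if_neg hneg]
        set pos := PySem.Chars.findFrom cl el (start : Int) none with hpos
        obtain ⟨hge, hpre, hmin⟩ := PySem.Chars.findFrom_natCast_spec cl el start hsle hneg
        rw [← hpos] at hge hpre hmin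
        clear_value pos
        have hposle : pos ≤ cl.length := by
          rw [hpos, PySem.Chars.findFrom_natCast cl el start hsle]
          split
          · omega
          · have := PySem.Chars.find_le_length (cl.drop start) el
            have hl : ((cl.drop start).length : Int) = (cl.length : Int) - start := by
              simp [List.length_drop]; omega
            omega
        have h0pos : 0 ≤ pos := by omega
        have hposnat : pos = ((pos.toNat : Nat) : Int) := by omega
        -- split the range at pos and pos+1
        rw [PySem.List.pyRange_one_append (start : Int) pos ((cl.length : Int) + 1)
              (by omega) (by omega),
            PySem.List.pyRange_one_cons (show pos < (cl.length : Int) + 1 by omega)]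
        rw [List.filter_append, List.map_append]
        have hfilt1 : (PySem.List.pyRange (start : Int) pos).filter
            (fun i => PySem.List.slice cl (some i) (some (i + (el.length : Int))) == el) = [] := by
          rw [List.filter_eq_nil_iff]
          intro i hi
          have hmem := (PySem.List.mem_pyRange_one).mp hi
          have hj : i = ((i.toNat : Nat) : Int) := by omega
          rw [hj]
          intro hP
          exact hmin i.toNat (by omega) (by omega) ((pvSlice_iff cl el i.toNat).mp hP)
        have hPpos : (PySem.List.slice cl (some pos) (some (pos + (el.length : Int))) == el) = true := by
          rw [hposnat]; exact (pvSlice_iff cl el pos.toNat).mpr hpre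
        rw [hfilt1, List.map_nil, List.nil_append]
        simp only [List.filter_cons]
        rw [if_pos hPpos, List.map_cons]
        congr 1
        have hih := ih (pos.toNat + 1) (by omega) (by omega)
        rw [show (((pos.toNat + 1 : Nat)) : Int) = pos + 1 by omega] at hih
        exact hih

lemma pvEntity_eq (content entity : String) :
    pvALoop (PySem.Chars.lower content.toList) (PySem.Chars.lower entity.toList)
        (entity.toList.length : Int) 0 (content.toList.length + 2) =
      ((PySem.List.pyRange 0 (((PySem.Chars.lower content.toList).length : Int) + 1)).filter
          (fun i => PySem.List.slice (PySem.Chars.lower content.toList) (some i)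
            (some (i + (entity.toList.length : Int))) == PySem.Chars.lower entity.toList)).map
        (fun i => (i, i + (entity.toList.length : Int))) := by
  have hL : (entity.toList.length : Int) = ((PySem.Chars.lower entity.toList).length : Int) := by
    rw [pvLower_length]
  rw [hL]
  have := pvALoop_eq (PySem.Chars.lower content.toList) (PySem.Chars.lower entity.toList)
    (content.toList.length + 2) 0 (by omega) (by rw [pvLower_length]; omega)
  simpa using this

lemma pvFoldlExt {A B : Type} (f g : A → B → A) (h : ∀ a b, f a b = g a b) :
    ∀ (l : List B) (i : A), List.foldl f i l = List.foldl g i l := by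
  intro l
  induction l with
  | nil => intro i; rfl
  | cons x xs ih => intro i; rw [List.foldl_cons, List.foldl_cons, h, ih]

-- ===== VERDICT (by name: the statement is the Claim_ definition above) =====
theorem find_entity_positions_py_spec : Claim_equal_find_entity_positions_py := by
  intro content entity_texts _
  show find_entity_positions_py content entity_texts = find_entity_positions_py_alt content entity_texts
  simp only [find_entity_positions_py, find_entity_positions_py_alt]
  congr 1
  apply pvFoldlExt
  intro d entity
  rw [pvEntity_eq]
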